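-- pv_equiv track=rewrite | github.com/PavelPatsey/AoC2024-Python | 21/d21p1.py | get_len_without_duplicates
-- ===== SOURCE A (Python) =====
-- def get_len_without_duplicates(seq):
--     """Получить длину без дубликатов"""
--     prev = seq[0]
--     res = 1
--     for curr in seq[1:]:
--         if curr != prev:
--             res += 1
--         prev = curr
--     return res
-- ===== SOURCE B (Python) =====
-- def get_len_without_duplicates(seq):
--     """Получить длину без дубликатов"""
--     def runs(s):
--         if len(s) <= 1:
--             return len(s)
--         m = len(s) // 2
--         left, right = s[:m], s[m:]
--         return runs(left) + runs(right) - (left[-1] == right[0])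
--     return runs(seq)
-- ===== Notes on version B (the rewrite author's own statement) =====
-- stated objective: alternative
-- what changed: Replaced A's single left-to-right prev/res scan by a divide-and-conquer recursion: split the list in half, count runs in each half recursively, and subtract 1 when the halves meet on equal values; B returns 0 on the empty list where A raises IndexError.
-- outside the precondition, e.g. on get_len_without_duplicates([]): A raises IndexError, B returns 0
import Mathlib
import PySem

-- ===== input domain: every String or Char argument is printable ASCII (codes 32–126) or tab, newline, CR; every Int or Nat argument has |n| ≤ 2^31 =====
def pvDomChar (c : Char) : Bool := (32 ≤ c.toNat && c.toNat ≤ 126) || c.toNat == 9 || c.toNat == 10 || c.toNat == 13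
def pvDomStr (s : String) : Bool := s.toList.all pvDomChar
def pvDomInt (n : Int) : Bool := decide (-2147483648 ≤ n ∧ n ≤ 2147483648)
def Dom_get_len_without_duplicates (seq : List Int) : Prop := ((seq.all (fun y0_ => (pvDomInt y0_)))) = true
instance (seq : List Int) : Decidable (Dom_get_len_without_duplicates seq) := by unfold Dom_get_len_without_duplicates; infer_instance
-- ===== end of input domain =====

-- B counts runs by divide-and-conquer (split in half, recurse, merge with a boundary
-- comparison) instead of A's left-to-right prev/res scan; B returns 0 on the empty
-- list where A raises IndexError (excluded by Pre_).
-- ===== PORT A =====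
def get_len_without_duplicates (seq : List Int) : Int :=
  match seq with
  | [] => 0  -- Python raises IndexError here (seq[0]); excluded by Pre_
  | p :: rest =>
    -- prev = seq[0]; res = 1; for curr in seq[1:]: if curr != prev: res += 1; prev = curr
    (rest.foldl (fun (st : Int × Int) curr =>
        (if curr ≠ st.2 then st.1 + 1 else st.1, curr)) (1, p)).1

-- ===== PORT B =====
-- runs(s): if len(s) <= 1: return len(s); m = len(s)//2;
--          return runs(s[:m]) + runs(s[m:]) - (s[:m][-1] == s[m:][0])
def pvRuns (l : List Int) : Int :=
  if _h : l.length ≤ 1 then (l.length : Int)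
  else
    let m := l.length / 2
    pvRuns (l.take m) + pvRuns (l.drop m)
      - (if (l.take m).getLast? = (l.drop m).head? then 1 else 0)
termination_by l.length
decreasing_by
  · simp; omega
  · simp; omega

def get_len_without_duplicates_alt (seq : List Int) : Int := pvRuns seq

-- ===== PRECONDITION & SPEC =====
-- Pre_ excludes exactly the empty list, on which A raises IndexError.
def Pre_get_len_without_duplicates (seq : List Int) : Prop := seq ≠ []
instance (seq : List Int) : Decidable (Pre_get_len_without_duplicates seq) := by unfold Pre_get_len_without_duplicates; infer_instance
def pvWitness_get_len_without_duplicates : List Int := [1, 1, 2]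

def Spec_get_len_without_duplicates (seq : List Int) (out : Int) : Prop := out = get_len_without_duplicates_alt seq
instance (seq : List Int) (out : Int) : Decidable (Spec_get_len_without_duplicates seq out) := by unfold Spec_get_len_without_duplicates; infer_instance

-- ===== CLAIM (what is proved, stated in full; the proofs are below) =====
def Claim_equal_get_len_without_duplicates : Prop := ∀ (seq : List Int), Dom_get_len_without_duplicates seq → Pre_get_len_without_duplicates seq → Spec_get_len_without_duplicates seq (get_len_without_duplicates seq)

-- ===== LEMMAS AND PROOFS =====

-- number of adjacent differing pairs (proof-only characterisation)
def pvChanges : List Int → Int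
  | [] => 0
  | [_] => 0
  | x :: y :: t => (if y ≠ x then 1 else 0) + pvChanges (y :: t)

lemma pv_fold_eq (rest : List Int) : ∀ (p r : Int),
    (rest.foldl (fun (st : Int × Int) curr =>
        (if curr ≠ st.2 then st.1 + 1 else st.1, curr)) (r, p)).1
      = r + pvChanges (p :: rest) := by
  induction rest with
  | nil => intro p r; simp [pvChanges]
  | cons y ys ih =>
    intro p r
    simp only [List.foldl, pvChanges, ih]
    by_cases h : y = p <;> simp [h] <;> ring

lemma pvChanges_append (a : List Int) : ∀ (y : Int) (b : List Int), a ≠ [] →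
    pvChanges (a ++ y :: b)
      = pvChanges a + (if a.getLast? = some y then 0 else 1) + pvChanges (y :: b) := by
  induction a with
  | nil => intro y b h; exact absurd rfl h
  | cons x t ih =>
    intro y b _
    cases t with
    | nil =>
      by_cases h : y = x
      · simp [pvChanges, h]
      · simp [pvChanges, h]
        exact fun he => h he.symm
    | cons z s =>
      have hrec := ih y b (by simp)
      simp only [List.cons_append] at hrec ⊢
      simp only [pvChanges, List.getLast?_cons_cons]
      rw [hrec]
      ring

lemma pvRuns_eq (l : List Int) : pvRuns l = if l = [] then 0 else 1 + pvChanges l := by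
  induction l using pvRuns.induct with
  | case1 l h =>
    rw [pvRuns]; simp [h]
    match l, h with
    | [], _ => simp
    | [x], _ => simp [pvChanges]
  | case2 l h m ih1 ih2 =>
    simp only [show m = l.length / 2 from rfl] at ih1 ih2
    have hlen : 2 ≤ l.length := by omega
    have hm1 : 1 ≤ l.length / 2 := by omega
    have hm2 : l.length / 2 < l.length := by omega
    have hta : l.take (l.length / 2) ≠ [] := by
      intro he
      have h2 := congrArg List.length he
      rw [List.length_take] at h2
      simp only [List.length_nil] at h2
      omega
    have hda : l.drop (l.length / 2) ≠ [] := by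
      intro he
      have h2 := congrArg List.length he
      rw [List.length_drop] at h2
      simp only [List.length_nil] at h2
      omega
    rw [pvRuns]
    simp only [dif_neg h]
    rw [ih1, ih2, if_neg hta, if_neg hda]
    obtain ⟨y, b, hd⟩ := List.exists_cons_of_ne_nil hda
    have hsplit : l = l.take (l.length / 2) ++ y :: b := by
      rw [← hd]; exact (List.take_append_drop _ l).symm
    have hne : l ≠ [] := by intro he; subst he; simp at hlen
    rw [if_neg hne]
    conv_rhs => rw [hsplit]
    rw [pvChanges_append _ y b hta, hd]
    simp only [List.head?_cons]
    by_cases hy : (l.take (l.length / 2)).getLast? = some y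
    · rw [if_pos hy, if_pos hy]; ring
    · rw [if_neg hy, if_neg hy]; ring

-- ===== VERDICT (by name: the statement is the Claim_ definition above) =====
theorem get_len_without_duplicates_spec : Claim_equal_get_len_without_duplicates := by
  intro seq _ hpre
  unfold Spec_get_len_without_duplicates get_len_without_duplicates_alt
  rw [pvRuns_eq, if_neg hpre]
  match seq, hpre with
  | p :: rest, _ =>
    show (rest.foldl _ (1, p)).1 = _
    rw [pv_fold_eq]
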